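-- pv_equiv track=rewrite | github.com/psh0706/algorithm | 우테코 4기/7번.py | solution
-- ===== SOURCE A (Python) =====
-- def solution(grid, clockwise):
--     answer = []
--     length = len(grid)
--     if clockwise:
--         for i in range(length, 0, -1):
--             result = ''
--
--             idx = length - 1
--             for j in range(len(grid) - i, 0, -1):
--                 k = j * 2 - 1
--                 result += grid[idx][k:k + 2][::-1]
--                 idx -= 1
--
--             result += grid[i - 1][0]
--
--             answer.append(result)
--
--     else:
--         for i in range(length):
--             grid[i] = grid[i][::-1]
--
--         for i in range(length, 0, -1):
--             result = grid[i - 1][0]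
--             idx = length - 1
--             temp = ''
--             for j in range(len(grid) - i, 0, -1):
--                 k = j * 2 - 1
--                 temp = grid[idx][k:k + 2] + temp
--                 idx -= 1
--             result += temp
--             answer.append(result)
--
--     return answer
-- ===== SOURCE B (Python) =====
-- def solution(grid, clockwise):
--     # Single scatter pass: walk the grid rows once and append each fragment
--     # to the output buffer it belongs to, then join.  Same in-place row
--     # reversal of `grid` as the original in the non-clockwise case.
--     n = len(grid)
--     bufs = [[] for _ in range(n)]
--     if clockwise:
--         for idx in range(n - 1, -1, -1):
--             for j in range(1, idx + 1):
--                 bufs[j + n - 1 - idx].append(grid[idx][2 * j - 1:2 * j + 1][::-1])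
--             bufs[n - 1 - idx].append(grid[idx][0])
--     else:
--         for i in range(n):
--             grid[i] = grid[i][::-1]
--         for idx in range(n):
--             bufs[n - 1 - idx].append(grid[idx][0])
--             for j in range(1, idx + 1):
--                 bufs[j + n - 1 - idx].append(grid[idx][2 * j - 1:2 * j + 1])
--     return [''.join(b) for b in bufs]
-- ===== Notes on version B (the rewrite author's own statement) =====
-- stated objective: alternative
-- what changed: B replaces A's per-output-row gather (an outer loop over output rows, each rebuilding its row with a nested descending index walk over the grid) by a single scatter pass: it walks the grid rows once, appending each extracted 1-2 character fragment and head character to a preallocated per-output-row buffer, and joins the buffers at the end; B performs the same in-place row reversal of grid as A in the non-clockwise case.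
import Mathlib
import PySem

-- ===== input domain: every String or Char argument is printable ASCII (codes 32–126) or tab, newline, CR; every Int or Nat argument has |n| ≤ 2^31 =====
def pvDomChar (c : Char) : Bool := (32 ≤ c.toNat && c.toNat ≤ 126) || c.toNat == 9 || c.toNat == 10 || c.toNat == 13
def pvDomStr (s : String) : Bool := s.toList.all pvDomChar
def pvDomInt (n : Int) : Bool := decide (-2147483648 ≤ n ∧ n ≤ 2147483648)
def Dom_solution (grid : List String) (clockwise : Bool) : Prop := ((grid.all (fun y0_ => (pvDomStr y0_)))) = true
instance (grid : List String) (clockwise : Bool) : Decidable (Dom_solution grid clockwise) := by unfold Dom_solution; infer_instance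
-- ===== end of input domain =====

-- B replaces A's per-row gather (nested descending index loops rebuilding each output row)
-- by a single scatter pass over the grid rows into preallocated output buffers (objective:
-- alternative decomposition, same cost); B performs the same in-place row reversal of `grid`
-- as A in the non-clockwise case, so side effects match too.

-- ===== PORT A =====
def solution (grid : List String) (clockwise : Bool) : List String :=
  let g : List (List Char) := grid.map String.toList
  let length : Int := (g.length : Int)
  if clockwise then
    (PySem.List.pyRange length 0 (-1)).foldl (fun answer i =>
      let st := (PySem.List.pyRange (length - i) 0 (-1)).foldl
        (fun (p : List Char × Int) j =>
          let k := j * 2 - 1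
          (p.1 ++ (PySem.List.slice (PySem.List.pyGetD g p.2 []) (some k) (some (k + 2))).reverse,
           p.2 - 1))
        (([] : List Char), length - 1)
      answer ++ [String.ofList (st.1 ++ [PySem.List.pyGetD (PySem.List.pyGetD g (i - 1) []) 0 ' '])]) []
  else
    let g := (PySem.List.pyRange 0 length 1).foldl
      (fun h i => PySem.List.pySetD h i (PySem.List.pyGetD h i []).reverse) g
    (PySem.List.pyRange length 0 (-1)).foldl (fun answer i =>
      let result : List Char := [PySem.List.pyGetD (PySem.List.pyGetD g (i - 1) []) 0 ' ']
      let st := (PySem.List.pyRange (length - i) 0 (-1)).foldl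
        (fun (p : List Char × Int) j =>
          let k := j * 2 - 1
          ((PySem.List.slice (PySem.List.pyGetD g p.2 []) (some k) (some (k + 2))) ++ p.1,
           p.2 - 1))
        (([] : List Char), length - 1)
      answer ++ [String.ofList (result ++ st.1)]) []

-- ===== PORT B =====
def solution_alt (grid : List String) (clockwise : Bool) : List String :=
  let g : List (List Char) := grid.map String.toList
  let n : Int := (g.length : Int)
  let bufs0 : List (List (List Char)) := List.replicate g.length []
  let bufs :=
    if clockwise then
      (PySem.List.pyRange (n - 1) (-1) (-1)).foldl (fun bufs idx =>
        let bufs := (PySem.List.pyRange 1 (idx + 1) 1).foldl (fun bufs j =>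
          PySem.List.pySetD bufs (j + n - 1 - idx)
            (PySem.List.pyGetD bufs (j + n - 1 - idx) [] ++
              [(PySem.List.slice (PySem.List.pyGetD g idx []) (some (2 * j - 1)) (some (2 * j + 1))).reverse])) bufs
        PySem.List.pySetD bufs (n - 1 - idx)
          (PySem.List.pyGetD bufs (n - 1 - idx) [] ++
            [[PySem.List.pyGetD (PySem.List.pyGetD g idx []) 0 ' ']])) bufs0
    else
      let g := (PySem.List.pyRange 0 n 1).foldl
        (fun h i => PySem.List.pySetD h i (PySem.List.pyGetD h i []).reverse) g
      (PySem.List.pyRange 0 n 1).foldl (fun bufs idx =>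
        let bufs := PySem.List.pySetD bufs (n - 1 - idx)
          (PySem.List.pyGetD bufs (n - 1 - idx) [] ++
            [[PySem.List.pyGetD (PySem.List.pyGetD g idx []) 0 ' ']])
        (PySem.List.pyRange 1 (idx + 1) 1).foldl (fun bufs j =>
          PySem.List.pySetD bufs (j + n - 1 - idx)
            (PySem.List.pyGetD bufs (j + n - 1 - idx) [] ++
              [PySem.List.slice (PySem.List.pyGetD g idx []) (some (2 * j - 1)) (some (2 * j + 1))])) bufs) bufs0
  bufs.map (fun b => String.ofList b.flatten)

-- ===== PRECONDITION & SPEC =====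
-- Pre_ excludes exactly the inputs where Python A raises IndexError: some row of `grid`
-- is the empty string (A evaluates grid[i-1][0] for every row).
def Pre_solution (grid : List String) (clockwise : Bool) : Prop := ∀ s ∈ grid, s ≠ ""
instance (grid : List String) (clockwise : Bool) : Decidable (Pre_solution grid clockwise) := by unfold Pre_solution; infer_instance
def pvWitness_solution : List String × Bool := (["abcde", "fgh", "i"], true)

def Spec_solution (grid : List String) (clockwise : Bool) (out : List String) : Prop := out = solution_alt grid clockwise
instance (grid : List String) (clockwise : Bool) (out : List String) : Decidable (Spec_solution grid clockwise out) := by unfold Spec_solution; infer_instance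

-- ===== CLAIM (what is proved, stated in full; the proofs are below) =====
def Claim_equal_solution : Prop := ∀ (grid : List String) (clockwise : Bool), Dom_solution grid clockwise → Pre_solution grid clockwise → Spec_solution grid clockwise (solution grid clockwise)


-- ===== LEMMAS AND PROOFS =====

-- proof-side abbreviations: the two fragment shapes and the head character
def fragCW (g : List (List Char)) (j idx : Int) : List Char :=
  (PySem.List.slice (PySem.List.pyGetD g idx []) (some (j * 2 - 1)) (some (j * 2 - 1 + 2))).reverse

def fragN (g : List (List Char)) (j idx : Int) : List Char :=
  PySem.List.slice (PySem.List.pyGetD g idx []) (some (j * 2 - 1)) (some (j * 2 - 1 + 2))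

def headC (g : List (List Char)) (idx : Int) : Char :=
  PySem.List.pyGetD (PySem.List.pyGetD g idx []) 0 ' '

-- common closed form of output row `a` (0-based), clockwise / counter-clockwise
def rowCW (g : List (List Char)) (n a : Nat) : List Char :=
  ((List.range a).map (fun (t : Nat) => fragCW g ((a : Int) - t) ((n : Int) - 1 - t))).flatten ++
    [headC g ((n : Int) - 1 - a)]

def rowCCW (g : List (List Char)) (n a : Nat) : List Char :=
  headC g ((n : Int) - 1 - a) ::
    ((List.range a).map (fun (u : Nat) => fragN g ((u : Int) + 1) ((n : Int) - a + u))).flatten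

-- the reversed grid both ports compute by the identical fold in the non-clockwise branch
def rev2 (g : List (List Char)) : List (List Char) :=
  (PySem.List.pyRange 0 (g.length : Int) 1).foldl
    (fun h i => PySem.List.pySetD h i (PySem.List.pyGetD h i []).reverse) g

-- B's scatter step: append item p.2 to buffer p.1
def scat (bufs : List (List (List Char))) (p : Int × List Char) : List (List (List Char)) :=
  PySem.List.pySetD bufs p.1 (PySem.List.pyGetD bufs p.1 [] ++ [p.2])

-- B's clockwise contribution list of the k-th processed source row (index n-1-k)
def contribCW (g : List (List Char)) (k : Nat) : List (Int × List Char) :=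
  (PySem.List.pyRange 1 (((g.length : Int) - 1 - k) + 1) 1).map
    (fun j => (j + (g.length : Int) - 1 - ((g.length : Int) - 1 - k),
      (PySem.List.slice (PySem.List.pyGetD g ((g.length : Int) - 1 - k) [])
        (some (2 * j - 1)) (some (2 * j + 1))).reverse)) ++
  [((g.length : Int) - 1 - ((g.length : Int) - 1 - k),
    [PySem.List.pyGetD (PySem.List.pyGetD g ((g.length : Int) - 1 - k) []) 0 ' '])]

-- B's counter-clockwise contribution list of source row k (read from the reversed grid g2)
def contribCCW (g2 : List (List Char)) (n : Nat) (k : Nat) : List (Int × List Char) :=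
  ((n : Int) - 1 - (k : Int),
    [PySem.List.pyGetD (PySem.List.pyGetD g2 (k : Int) []) 0 ' ']) ::
  (PySem.List.pyRange 1 ((k : Int) + 1) 1).map
    (fun j => (j + (n : Int) - 1 - (k : Int),
      PySem.List.slice (PySem.List.pyGetD g2 (k : Int) []) (some (2 * j - 1)) (some (2 * j + 1))))

lemma pyRange_neg_one (a b : Int) :
    PySem.List.pyRange a b (-1) = (List.range (a - b).toNat).map (fun (k : Nat) => a - (k : Int)) := by
  by_cases h : b < a
  · simp only [PySem.List.pyRange, if_neg (by norm_num : ¬((-1:Int) = 0)),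
      if_neg (by norm_num : ¬(0 < (-1:Int))), if_pos h]
    have hc : (a - b + - -1 - 1) / - -1 = a - b := by norm_num
    rw [hc]
    apply List.map_congr_left
    intro k _
    ring
  · simp only [PySem.List.pyRange, if_neg (by norm_num : ¬((-1:Int) = 0)),
      if_neg (by norm_num : ¬(0 < (-1:Int))), if_neg h]
    have : (a - b).toNat = 0 := by omega
    simp [this]

lemma pyRange_one_to (c : Int) (hc : 0 ≤ c) :
    PySem.List.pyRange 1 (c + 1) 1 = (List.range c.toNat).map (fun (k : Nat) => (1 : Int) + k) := by
  rw [PySem.List.pyRange_of_pos _ _ (by norm_num : (0:Int) < 1)]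
  by_cases h : (1:Int) < c + 1
  · rw [if_pos h]
    have hc2 : (c + 1 - 1 + 1 - 1) / 1 = c := by norm_num
    rw [hc2]
    apply List.map_congr_left
    intro k _
    ring
  · rw [if_neg h]
    have : c.toNat = 0 := by omega
    simp [this]

lemma foldl_scat_length (L : List (Int × List Char)) (bufs : List (List (List Char))) :
    (L.foldl scat bufs).length = bufs.length := by
  induction L generalizing bufs with
  | nil => rfl
  | cons p L ih => simp [List.foldl_cons, ih, scat, PySem.List.length_pySetD]

lemma getD_scat (bufs : List (List (List Char))) (p : Int × List Char) (a : Nat)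
    (h0 : 0 ≤ p.1) (h1 : p.1 < (bufs.length : Int)) :
    PySem.List.pyGetD (scat bufs p) (a : Int) [] =
      if (a : Int) = p.1 then PySem.List.pyGetD bufs (a : Int) [] ++ [p.2]
      else PySem.List.pyGetD bufs (a : Int) [] := by
  have hp : p.1 = ((p.1.toNat : Nat) : Int) := by omega
  rw [scat, hp, PySem.List.pyGetD_pySetD_natCast _ _ _ _ _ (by omega)]
  split_ifs with h2 h3 h3
  · rw [h2]
  · omega
  · omega
  · rfl

lemma foldl_scat_getD (L : List (Int × List Char)) (bufs : List (List (List Char))) (a : Nat)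
    (hL : ∀ p ∈ L, 0 ≤ p.1 ∧ p.1 < (bufs.length : Int)) :
    PySem.List.pyGetD (L.foldl scat bufs) (a : Int) [] =
      PySem.List.pyGetD bufs (a : Int) [] ++
        L.filterMap (fun p => if (a : Int) = p.1 then some p.2 else none) := by
  induction L generalizing bufs with
  | nil => simp
  | cons p L ih =>
    have hp := hL p (by simp)
    rw [List.foldl_cons, ih _ (fun q hq => by
      have := hL q (by simp [hq])
      simpa [scat, PySem.List.length_pySetD] using this)]
    rw [getD_scat _ _ _ hp.1 hp.2, List.filterMap_cons]
    split_ifs with h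
    · simp [List.append_assoc]
    · simp

lemma filterMap_range_shift {α : Type} (m : Nat) (a base : Int) (f : Int → α) :
    ((List.range m).map (fun t : Nat => ((1 : Int) + t))).filterMap
        (fun j => if a = j + base then some (f j) else none) =
      if 1 ≤ a - base ∧ a - base ≤ (m : Int) then [f (a - base)] else [] := by
  induction m with
  | zero => simp; omega
  | succ m ih =>
    rw [List.range_succ, List.map_append, List.filterMap_append, ih]
    simp only [List.map_cons, List.map_nil, List.filterMap_cons, List.filterMap_nil]
    split_ifs with h1 h2 h2 <;> push_cast at * <;>
      first
      | (exfalso; omega)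
      | (simp_all; try omega)

lemma flatMap_eq_map_of {α β : Type} (l : List α) (f : α → List β) (g : α → β)
    (h : ∀ k ∈ l, f k = [g k]) : l.flatMap f = l.map g := by
  induction l with
  | nil => rfl
  | cons x l ih =>
    rw [List.flatMap_cons, h x (by simp), ih (fun k hk => h k (by simp [hk])), List.map_cons]
    rfl

lemma flatMap_eq_nil_of {α β : Type} (l : List α) (f : α → List β)
    (h : ∀ k ∈ l, f k = []) : l.flatMap f = [] := by
  induction l with
  | nil => rfl
  | cons x l ih =>
    rw [List.flatMap_cons, h x (by simp), ih (fun k hk => h k (by simp [hk]))]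
    rfl

lemma gatherCW {α : Type} (n a : Nat) (ha : a < n) (frag : Nat → α) (hd : Nat → α) :
    (List.range n).flatMap
        (fun k => (if k < a then [frag k] else []) ++ (if a = k then [hd k] else [])) =
      (List.range a).map frag ++ [hd a] := by
  have hn : n = (a + 1) + (n - a - 1) := by omega
  rw [hn, List.range_add, List.flatMap_append, List.range_succ, List.flatMap_append]
  rw [flatMap_eq_map_of (List.range a) _ frag (fun k hk => by
    simp only [List.mem_range] at hk
    rw [if_pos hk, if_neg (by omega)]
    simp)]
  rw [flatMap_eq_nil_of (List.map _ (List.range (n - a - 1))) _ (fun k hk => by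
    simp only [List.mem_map, List.mem_range] at hk
    obtain ⟨x, _, rfl⟩ := hk
    rw [if_neg (by omega), if_neg (by omega)]
    rfl)]
  simp

lemma gatherCCW {α : Type} (n a : Nat) (ha : a < n) (hd : Nat → α) (frag : Nat → α) :
    (List.range n).flatMap
        (fun k => (if k = n - 1 - a then [hd k] else []) ++ (if n - a ≤ k then [frag k] else [])) =
      hd (n - 1 - a) :: (List.range a).map (fun u => frag (n - a + u)) := by
  have hn : n = ((n - 1 - a) + 1) + a := by omega
  rw [hn, List.range_add, List.flatMap_append, List.range_succ, List.flatMap_append]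
  rw [flatMap_eq_nil_of (List.range (n - 1 - a)) _ (fun k hk => by
    simp only [List.mem_range] at hk
    rw [if_neg (by omega), if_neg (by omega)]
    rfl)]
  rw [flatMap_eq_map_of (List.map _ (List.range a)) _
      (fun k => frag k) (fun k hk => by
    simp only [List.mem_map, List.mem_range] at hk
    obtain ⟨x, _, rfl⟩ := hk
    rw [if_neg (by omega), if_pos (by omega)]
    rfl)]
  rw [List.flatMap_cons]
  rw [if_pos (by omega), if_neg (by omega)]
  simp only [List.flatMap_nil, List.append_nil, List.nil_append]
  simp only [List.map_map, List.singleton_append]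
  congr 1
  · congr 1
    omega
  · apply List.map_congr_left
    intro x _
    simp only [Function.comp]
    congr 1
    omega

lemma innerACW (g : List (List Char)) :
    ∀ (m : Nat) (idx : Int) (r : List Char),
      (((List.range m).map (fun (t : Nat) => (m : Int) - t)).foldl
          (fun (p : List Char × Int) j =>
            (p.1 ++ (PySem.List.slice (PySem.List.pyGetD g p.2 [])
                (some (j * 2 - 1)) (some (j * 2 - 1 + 2))).reverse, p.2 - 1))
          (r, idx)).1 =
        r ++ ((List.range m).map (fun (t : Nat) => fragCW g ((m : Int) - t) (idx - t))).flatten := by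
  intro m
  induction m with
  | zero => simp
  | succ m ih =>
    intro idx r
    rw [List.range_succ_eq_map, List.map_cons, List.foldl_cons]
    have hmap : (List.map Nat.succ (List.range m)).map (fun (t : Nat) => ((m + 1 : Nat) : Int) - t) =
        (List.range m).map (fun (t : Nat) => (m : Int) - t) := by
      rw [List.map_map]
      apply List.map_congr_left
      intro t _
      simp only [Function.comp, Nat.succ_eq_add_one]
      push_cast
      ring
    rw [hmap, ih]
    rw [List.map_cons, List.flatten_cons, List.map_map]
    have hmap2 : (List.range m).map ((fun (t : Nat) => fragCW g (((m + 1 : Nat) : Int) - ↑t) (idx - ↑t)) ∘ Nat.succ) =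
        (List.range m).map (fun (t : Nat) => fragCW g ((m : Int) - ↑t) (idx - 1 - ↑t)) := by
      apply List.map_congr_left
      intro t _
      simp only [Function.comp, Nat.succ_eq_add_one]
      congr 1 <;> push_cast <;> ring
    rw [hmap2]
    simp only [fragCW, List.append_assoc, Nat.cast_zero, sub_zero]

lemma innerACCW (g : List (List Char)) :
    ∀ (m : Nat) (idx : Int) (r : List Char),
      (((List.range m).map (fun (t : Nat) => (m : Int) - t)).foldl
          (fun (p : List Char × Int) j =>
            ((PySem.List.slice (PySem.List.pyGetD g p.2 [])
                (some (j * 2 - 1)) (some (j * 2 - 1 + 2))) ++ p.1, p.2 - 1))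
          (r, idx)).1 =
        ((List.range m).map (fun (u : Nat) => fragN g ((u : Int) + 1) (idx - m + 1 + u))).flatten ++ r := by
  intro m
  induction m with
  | zero => simp
  | succ m ih =>
    intro idx r
    conv_lhs => rw [List.range_succ_eq_map, List.map_cons, List.foldl_cons]
    have hmap : (List.map Nat.succ (List.range m)).map (fun (t : Nat) => ((m + 1 : Nat) : Int) - t) =
        (List.range m).map (fun (t : Nat) => (m : Int) - t) := by
      rw [List.map_map]
      apply List.map_congr_left
      intro t _
      simp only [Function.comp, Nat.succ_eq_add_one]
      push_cast
      ring
    rw [hmap, ih]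
    conv_rhs => rw [List.range_succ, List.map_append, List.flatten_append]
    have hmap2 : (List.range m).map (fun (u : Nat) => fragN g ((u : Int) + 1) (idx - (m + 1 : Nat) + 1 + u)) =
        (List.range m).map (fun (u : Nat) => fragN g ((u : Int) + 1) (idx - 1 - m + 1 + u)) := by
      apply List.map_congr_left
      intro u _
      congr 1
      push_cast
      ring
    rw [hmap2]
    simp only [fragN, List.map_cons, List.map_nil, List.flatten_cons, List.flatten_nil,
      List.append_assoc, List.append_nil, Nat.cast_zero, sub_zero]
    push_cast
    rw [show idx - ((m : Int) + 1) + 1 + (m : Int) = idx from by ring]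

lemma solution_cw (grid : List String) :
    solution grid true =
      (List.range grid.length).map
        (fun a => String.ofList (rowCW (grid.map String.toList) grid.length a)) := by
  have hlen : (grid.map String.toList).length = grid.length := by simp
  rw [← hlen]
  set g := grid.map String.toList with hg
  simp only [solution, if_pos]
  rw [pyRange_neg_one, List.foldl_map]
  rw [show ((g.length : Int) - 0).toNat = g.length from by omega]
  rw [PySem.List.foldl_append_singleton_eq_map]
  rw [List.nil_append]
  apply List.map_congr_left
  intro k hk
  simp only [List.mem_range] at hk
  rw [show (g.length : Int) - ((g.length : Int) - (k : Int)) = (k : Int) from by ring]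
  rw [pyRange_neg_one, show ((k : Int) - 0).toNat = k from by omega]
  rw [innerACW g k ((g.length : Int) - 1) []]
  rw [List.nil_append]
  rw [show (g.length : Int) - (k : Int) - 1 = (g.length : Int) - 1 - (k : Int) from by ring]
  rfl

lemma solution_ccw (grid : List String) :
    solution grid false =
      (List.range grid.length).map
        (fun a => String.ofList (rowCCW (rev2 (grid.map String.toList)) grid.length a)) := by
  have hlen : (grid.map String.toList).length = grid.length := by simp
  rw [← hlen]
  simp only [solution, Bool.false_eq_true, if_false]
  set g := grid.map String.toList with hg
  rw [show ((PySem.List.pyRange 0 (g.length : Int) 1).foldl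
      (fun h i => PySem.List.pySetD h i (PySem.List.pyGetD h i []).reverse) g) = rev2 g from rfl]
  rw [pyRange_neg_one, List.foldl_map]
  rw [show ((g.length : Int) - 0).toNat = g.length from by omega]
  rw [PySem.List.foldl_append_singleton_eq_map]
  rw [List.nil_append]
  apply List.map_congr_left
  intro k hk
  simp only [List.mem_range] at hk
  rw [show (g.length : Int) - ((g.length : Int) - (k : Int)) = (k : Int) from by ring]
  rw [pyRange_neg_one, show ((k : Int) - 0).toNat = k from by omega]
  rw [innerACCW (rev2 g) k ((g.length : Int) - 1) []]
  rw [List.append_nil]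
  congr 1
  rw [rowCCW, List.singleton_append]
  congr 1
  · rw [headC]
    congr 2
    ring
  · congr 1
    apply List.map_congr_left
    intro u _
    congr 1
    ring

lemma solution_alt_cw (grid : List String) :
    solution_alt grid true =
      (List.range grid.length).map
        (fun a => String.ofList (rowCW (grid.map String.toList) grid.length a)) := by
  have hlen : (grid.map String.toList).length = grid.length := by simp
  rw [← hlen]
  simp only [solution_alt, if_pos]
  set g := grid.map String.toList with hg
  rw [pyRange_neg_one, List.foldl_map]
  rw [show ((g.length : Int) - 1 - (-1)).toNat = g.length from by omega]
  rw [PySem.List.foldl_congr_mem _ _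
    (fun bufs k => (contribCW g k).foldl scat bufs) _
    (fun bufs k _ => by
      simp only [contribCW, List.foldl_append, List.foldl_map, List.foldl_cons, List.foldl_nil, scat])]
  rw [← List.foldl_flatMap]
  set L := (List.range g.length).flatMap (contribCW g) with hL
  have hbnd : ∀ p ∈ L, 0 ≤ p.1 ∧ p.1 < ((List.replicate g.length ([] : List (List Char))).length : Int) := by
    intro p hp
    rw [hL, List.mem_flatMap] at hp
    obtain ⟨k, hk, hpk⟩ := hp
    simp only [List.mem_range] at hk
    simp only [contribCW, List.mem_append, List.mem_map, List.mem_singleton] at hpk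
    rw [List.length_replicate]
    rcases hpk with ⟨j, hj, rfl⟩ | rfl
    · rw [pyRange_one_to _ (by omega)] at hj
      simp only [List.mem_map, List.mem_range] at hj
      obtain ⟨x, hx, rfl⟩ := hj
      constructor <;> simp <;> omega
    · constructor <;> simp <;> omega
  have hflen : (L.foldl scat (List.replicate g.length [])).length = g.length := by
    rw [foldl_scat_length, List.length_replicate]
  apply List.ext_getElem
  · simp [hflen]
  · intro a h1 h2
    simp only [List.getElem_map, List.getElem_range]
    rw [List.length_map, hflen] at h1
    congr 1
    have hget : (L.foldl scat (List.replicate g.length []))[a] =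
        PySem.List.pyGetD (L.foldl scat (List.replicate g.length [])) (a : Int) [] := by
      rw [PySem.List.pyGetD_natCast, List.getD_eq_getElem _ _ (by rw [hflen]; exact h1)]
    rw [hget, foldl_scat_getD _ _ _ hbnd]
    have h0 : PySem.List.pyGetD (List.replicate g.length ([] : List (List Char))) (a : Int) [] = [] := by
      rw [PySem.List.pyGetD_natCast, List.getD_eq_getElem _ _ (by simpa using h1)]
      simp
    rw [h0, List.nil_append, hL, List.filterMap_flatMap]
    rw [List.flatMap_congr (g := fun k =>
        (if k < a then [fragCW g ((a : Int) - k) ((g.length : Int) - 1 - k)] else []) ++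
        (if a = k then [[headC g ((g.length : Int) - 1 - k)]] else []))
      (fun k hk => ?_)]
    · rw [gatherCW g.length a h1
        (fun k => fragCW g ((a : Int) - k) ((g.length : Int) - 1 - k))
        (fun k => [headC g ((g.length : Int) - 1 - k)])]
      simp only [rowCW, List.flatten_append, List.flatten_cons, List.flatten_nil, List.append_nil]
    · -- per-k filterMap computation
      simp only [List.mem_range] at hk
      simp only [contribCW, List.filterMap_append, List.filterMap_map]
      rw [pyRange_one_to _ (by omega : (0:Int) ≤ (g.length : Int) - 1 - k)]
      have ha2 : a < g.length := h1
      have harith : ∀ j : Int,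
          j + (g.length : Int) - 1 - ((g.length : Int) - 1 - (k : Int)) = j + (k : Int) :=
        fun j => by ring
      simp only [Function.comp_def, harith]
      rw [filterMap_range_shift]
      congr 1
      · -- fragment part
        split_ifs with hc1 hc2 hc2
        · have e1 : (2 * ((a : Int) - (k : Int)) - 1) = ((a : Int) - (k : Int)) * 2 - 1 := by ring
          have e2 : (2 * ((a : Int) - (k : Int)) + 1) = ((a : Int) - (k : Int)) * 2 - 1 + 2 := by ring
          simp only [fragCW, e1, e2]
        · exfalso; omega
        · exfalso; omega
        · rfl
      · -- head part
        simp only [List.filterMap_cons, List.filterMap_nil]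
        have : ((g.length : Int) - 1 - ((g.length : Int) - 1 - (k : Nat)) : Int) = (k : Int) := by omega
        rw [this]
        split_ifs with hc1 hc2 hc2
        · rfl
        · exfalso; omega
        · exfalso; omega
        · rfl

lemma solution_alt_ccw (grid : List String) :
    solution_alt grid false =
      (List.range grid.length).map
        (fun a => String.ofList (rowCCW (rev2 (grid.map String.toList)) grid.length a)) := by
  have hlen : (grid.map String.toList).length = grid.length := by simp
  rw [← hlen]
  simp only [solution_alt, Bool.false_eq_true, if_false]
  set g := grid.map String.toList with hg
  rw [show ((PySem.List.pyRange 0 (g.length : Int) 1).foldl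
      (fun h i => PySem.List.pySetD h i (PySem.List.pyGetD h i []).reverse) g) = rev2 g from rfl]
  rw [PySem.List.pyRange_zero_natCast, List.foldl_map]
  rw [PySem.List.foldl_congr_mem _ _
    (fun bufs k => (contribCCW (rev2 g) g.length k).foldl scat bufs) _
    (fun bufs k _ => by
      simp only [contribCCW, List.foldl_cons, List.foldl_map, scat])]
  rw [← List.foldl_flatMap]
  set L := (List.range g.length).flatMap (contribCCW (rev2 g) g.length) with hL
  have hbnd : ∀ p ∈ L, 0 ≤ p.1 ∧ p.1 < ((List.replicate g.length ([] : List (List Char))).length : Int) := by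
    intro p hp
    rw [hL, List.mem_flatMap] at hp
    obtain ⟨k, hk, hpk⟩ := hp
    simp only [List.mem_range] at hk
    simp only [contribCCW, List.mem_cons, List.mem_map] at hpk
    rw [List.length_replicate]
    rcases hpk with rfl | ⟨j, hj, rfl⟩
    · constructor <;> simp <;> omega
    · rw [pyRange_one_to _ (by omega)] at hj
      simp only [List.mem_map, List.mem_range] at hj
      obtain ⟨x, hx, rfl⟩ := hj
      constructor <;> simp <;> omega
  have hflen : (L.foldl scat (List.replicate g.length [])).length = g.length := by
    rw [foldl_scat_length, List.length_replicate]
  apply List.ext_getElem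
  · simp [hflen]
  · intro a h1 h2
    simp only [List.getElem_map, List.getElem_range]
    rw [List.length_map, hflen] at h1
    congr 1
    have hget : (L.foldl scat (List.replicate g.length []))[a] =
        PySem.List.pyGetD (L.foldl scat (List.replicate g.length [])) (a : Int) [] := by
      rw [PySem.List.pyGetD_natCast, List.getD_eq_getElem _ _ (by rw [hflen]; exact h1)]
    rw [hget, foldl_scat_getD _ _ _ hbnd]
    have h0 : PySem.List.pyGetD (List.replicate g.length ([] : List (List Char))) (a : Int) [] = [] := by
      rw [PySem.List.pyGetD_natCast, List.getD_eq_getElem _ _ (by simpa using h1)]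
      simp
    rw [h0, List.nil_append, hL, List.filterMap_flatMap]
    rw [List.flatMap_congr (g := fun k =>
        (if k = g.length - 1 - a then
          [[headC (rev2 g) ((g.length : Int) - 1 - a)]] else []) ++
        (if g.length - a ≤ k then
          [fragN (rev2 g) ((a : Int) - ((g.length : Int) - 1 - (k : Int))) (k : Int)] else []))
      (fun k hk => ?_)]
    · rw [gatherCCW g.length a h1
        (fun _ => [headC (rev2 g) ((g.length : Int) - 1 - a)])
        (fun k => fragN (rev2 g) ((a : Int) - ((g.length : Int) - 1 - (k : Int))) (k : Int))]
      rw [List.flatten_cons, List.singleton_append, rowCCW]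
      congr 2
      apply List.map_congr_left
      intro u hu
      simp only [List.mem_range] at hu
      have ha2 : a < g.length := h1
      congr 1
      · omega
      · omega
    · -- per-k filterMap computation
      simp only [List.mem_range] at hk
      have ha2 : a < g.length := h1
      simp only [contribCCW, List.filterMap_cons, List.filterMap_map]
      rw [pyRange_one_to _ (by omega : (0:Int) ≤ (k : Int))]
      have harith : ∀ j : Int,
          j + (g.length : Int) - 1 - (k : Int) = j + ((g.length : Int) - 1 - (k : Int)) :=
        fun j => by ring
      simp only [Function.comp_def, harith]
      rw [filterMap_range_shift, Int.toNat_natCast]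
      by_cases hck : (a : Int) = (g.length : Int) - 1 - (k : Int)
      · simp only [if_pos hck]
        rw [if_pos (by omega : k = g.length - 1 - a),
          if_neg (by omega : ¬(1 ≤ (a : Int) - ((g.length : Int) - 1 - (k : Int)) ∧
            (a : Int) - ((g.length : Int) - 1 - (k : Int)) ≤ (k : Int))),
          if_neg (by omega : ¬(g.length - a ≤ k))]
        simp only [List.append_nil, headC]
        rw [show ((g.length : Int) - 1 - (a : Int)) = (k : Int) from by omega]
      · simp only [if_neg hck]
        rw [if_neg (by omega : ¬(k = g.length - 1 - a)), List.nil_append]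
        split_ifs with hc1 hc2 hc2
        · have e1 : (2 * ((a:Int) - ((g.length:Int) - 1 - (k:Int))) - 1) =
              ((a:Int) - ((g.length:Int) - 1 - (k:Int))) * 2 - 1 := by ring
          have e2 : (2 * ((a:Int) - ((g.length:Int) - 1 - (k:Int))) + 1) =
              ((a:Int) - ((g.length:Int) - 1 - (k:Int))) * 2 - 1 + 2 := by ring
          simp only [fragN, e1, e2]
        · exfalso; omega
        · exfalso; omega
        · rfl

-- ===== VERDICT (by name: the statement is the Claim_ definition above) =====
theorem solution_spec : Claim_equal_solution := by
  intro grid clockwise _ _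
  unfold Spec_solution
  cases clockwise
  · rw [solution_ccw, solution_alt_ccw]
  · rw [solution_cw, solution_alt_cw]
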